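-- pv_equiv track=rewrite | github.com/KevinYyyyyy/PyVulAudit | data_collection/analyze_call_graph.py | find_module_methods_and_chains_with_target
-- ===== SOURCE A (Python) =====
-- from collections import defaultdict
--
-- def analyze_function_calls(call_relations):
--     """
--     分析函数调用关系，构建调用图。
--     """
--     call_graph = defaultdict(set)
--     for func, called_funcs in call_relations.items():
--         call_graph[func].update(called_funcs)
--     return call_graph
--
-- def find_truncated_call_chains(call_graph, start_func, target_keywords):
--     """
--     查找从指定函数开始的所有可能调用链，并在找到目标关键字时截断调用链。
--     """
--     all_chains = []
--
--     def dfs(func, current_chain, visited):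
--         # 检查是否已经访问过当前函数（避免循环依赖）
--         if func in visited:
--             return
--         visited.add(func)
--
--         # 将当前函数加入调用链
--         current_chain.append(func)
--
--         # 检查是否满足目标关键字条件
--         if all(keyword in " -> ".join(current_chain) for keyword in target_keywords):
--             all_chains.append(list(current_chain))  # 保存当前调用链
--             current_chain.pop()  # 回溯
--             visited.remove(func)
--             return
--
--         # 继续递归查找
--         for called_func in sorted(call_graph.get(func, [])):
--             dfs(called_func, current_chain, visited)
--
--         # 回溯：移除当前函数并标记为未访问
--         current_chain.pop()
--         visited.remove(func)
--
--     # 开始递归查找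
--     dfs(start_func, [], set())
--     return all_chains
--
-- def find_module_methods_and_chains_with_target(call_relations, module_prefix, target_keywords):
--     """
--     查找指定模块中的所有方法及其调用链，并筛选包含目标关键字的调用链。
--     """
--     # 筛选出属于指定模块的方法
--     module_methods = {func for func in call_relations.keys() if func.startswith(module_prefix)}
--
--     # 构建调用图
--     call_graph = analyze_function_calls(call_relations)
--
--     # 查找每个方法的所有可能调用链，并筛选符合条件的调用链
--     method_chains_with_target = {}
--     for method in sorted(module_methods):
--         truncated_chains = find_truncated_call_chains(call_graph, method, target_keywords)
--         if truncated_chains: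
--             method_chains_with_target[method] = truncated_chains
--
--     return method_chains_with_target
-- ===== SOURCE B (Python) =====
-- def find_module_methods_and_chains_with_target(call_relations, module_prefix, target_keywords):
--     # Iterative explicit-stack DFS; the current chain itself serves as the visited set.
--     graph = {}
--     for func, called_funcs in call_relations.items():
--         graph.setdefault(func, set()).update(called_funcs)
--
--     module_methods = {func for func in call_relations.keys() if func.startswith(module_prefix)}
--
--     method_chains_with_target = {}
--     for method in sorted(module_methods):
--         chains = []
--         stack = [([], method)]
--         while stack:
--             chain, func = stack.pop()
--             if func in chain:
--                 continue
--             chain = chain + [func]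
--             if all(keyword in " -> ".join(chain) for keyword in target_keywords):
--                 chains.append(chain)
--                 continue
--             for called_func in sorted(graph.get(func, ()), reverse=True):
--                 stack.append((chain, called_func))
--         if chains:
--             method_chains_with_target[method] = chains
--     return method_chains_with_target
-- ===== Notes on version B (the rewrite author's own statement) =====
-- stated objective: alternative
-- what changed: The recursive backtracking dfs with a mutable chain and separate visited set is replaced by an iterative explicit-stack DFS whose per-frame chain snapshot doubles as the visited set (children pushed in reverse-sorted order to preserve emission order).
import Mathlib
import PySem

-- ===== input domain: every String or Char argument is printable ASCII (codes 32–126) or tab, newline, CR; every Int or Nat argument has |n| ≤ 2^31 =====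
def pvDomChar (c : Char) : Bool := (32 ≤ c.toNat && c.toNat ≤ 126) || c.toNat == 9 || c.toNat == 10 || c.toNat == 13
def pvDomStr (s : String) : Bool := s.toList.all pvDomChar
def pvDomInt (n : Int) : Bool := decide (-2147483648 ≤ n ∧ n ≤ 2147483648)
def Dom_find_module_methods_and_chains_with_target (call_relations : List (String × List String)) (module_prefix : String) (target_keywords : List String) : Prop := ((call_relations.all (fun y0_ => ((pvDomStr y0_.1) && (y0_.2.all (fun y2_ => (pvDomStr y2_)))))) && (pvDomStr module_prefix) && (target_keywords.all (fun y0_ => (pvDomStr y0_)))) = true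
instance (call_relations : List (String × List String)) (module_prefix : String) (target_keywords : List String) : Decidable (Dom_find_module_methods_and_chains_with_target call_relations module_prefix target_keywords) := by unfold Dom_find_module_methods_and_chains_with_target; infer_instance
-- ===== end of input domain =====

-- B replaces A's recursive backtracking dfs (mutable chain + visited set) by an iterative
-- explicit-stack DFS whose current chain doubles as the visited set; same return value, same cost class.

-- ===== PORT A =====
-- analyze_function_calls: defaultdict(set); call_graph[func].update(called_funcs)
def pvAnalyzeFunctionCalls (call_relations : List (String × List String)) : PySem.Dict String (PySem.Set String) :=
  call_relations.foldl
    (fun g p => PySem.Dict.insert g p.1 (PySem.Set.update (PySem.Dict.getD g p.1 PySem.Set.empty) p.2))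
    PySem.Dict.empty

-- dfs of find_truncated_call_chains; Python mutates current_chain/visited and restores them on
-- return, so each recursive call is rendered with its own chain/visited value and returns the
-- chains it appended to all_chains.  The Nat is a fuel guard (recursion depth only); the caller
-- passes strictly more than the number of function names in the input, so it never reaches 0.
def pvDfsA (graph : PySem.Dict String (PySem.Set String)) (kws : List String) :
    Nat → String → List String → PySem.Set String → List (List String)
  | 0, _, _, _ => []
  | fuel+1, func, chain, visited =>
    if PySem.Set.contains visited func then []
    else
      let visited' := PySem.Set.add visited func
      let chain' := chain ++ [func]
      if kws.all (fun kw => PySem.Str.isIn kw (PySem.Str.join " -> " chain')) then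
        [chain']
      else
        (PySem.List.sorted (PySem.Dict.getD graph func PySem.Set.empty) (fun x => x) false).foldl
          (fun acc c => acc ++ pvDfsA graph kws fuel c chain' visited') []

def find_module_methods_and_chains_with_target (call_relations : List (String × List String)) (module_prefix : String) (target_keywords : List String) : List (String × List (List String)) :=
  let module_methods : PySem.Set String :=
    PySem.Set.ofList ((call_relations.map (·.1)).filter (fun f => PySem.Str.startswith f module_prefix))
  let call_graph := pvAnalyzeFunctionCalls call_relations
  -- fuel: strictly more than the number of function-name occurrences, hence more than the number
  -- of distinct functions, so the depth guard in pvDfsA never fires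
  let fuel := (call_relations.map (·.1) ++ call_relations.flatMap (·.2)).length + 1
  (((PySem.List.sorted module_methods (fun x => x) false).foldl
    (fun res m =>
      let truncated_chains := pvDfsA call_graph target_keywords fuel m [] PySem.Set.empty
      if truncated_chains = [] then res else PySem.Dict.insert res m truncated_chains)
    PySem.Dict.empty) : PySem.Dict String (List (List String))).items

-- ===== PORT B =====
-- termination measure arithmetic for the explicit stack (used only by pvLoopB's decreasing_by)
theorem pvMeasurePush (bnd f : Nat) (chain' : List String) :
    ∀ (L : List String) (rest : List (List String × String × Nat)),
      ((L.foldl (fun st c => (chain', c, f) :: st) rest).map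
          (fun t : List String × String × Nat => (bnd + 2) ^ t.2.2)).sum
        = L.length * (bnd + 2) ^ f
            + ((rest.map (fun t : List String × String × Nat => (bnd + 2) ^ t.2.2)).sum) := by
  intro L
  induction L with
  | nil => intro rest; simp
  | cons c L ih =>
    intro rest
    rw [List.foldl_cons, ih]
    simp [Nat.succ_mul]
    ring

-- the while-stack loop of B; each frame is (chain, func, fuel).  fuel and the `take bnd` are
-- guards needed for termination only: bnd exceeds every out-degree and every chain length on
-- every input, so neither guard ever changes the computation.
def pvLoopB (graph : PySem.Dict String (PySem.Set String)) (kws : List String) (bnd : Nat) :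
    List (List String × String × Nat) → List (List String) → List (List String)
  | [], chains => chains
  | (chain, func, fuel) :: rest, chains =>
    if chain.contains func then pvLoopB graph kws bnd rest chains
    else
      match fuel with
      | 0 => pvLoopB graph kws bnd rest chains
      | f+1 =>
        let chain' := chain ++ [func]
        if kws.all (fun kw => PySem.Str.isIn kw (PySem.Str.join " -> " chain')) then
          pvLoopB graph kws bnd rest (chains ++ [chain'])
        else
          pvLoopB graph kws bnd
            (((PySem.List.sorted (PySem.Dict.getD graph func PySem.Set.empty) (fun x => x) true).take bnd).foldl
              (fun st c => (chain', c, f) :: st) rest)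
            chains
  termination_by stack _ => ((stack.map (fun t : List String × String × Nat => (bnd + 2) ^ t.2.2)).sum)
  decreasing_by
  · simp
  · simp
  · simp
  · rw [pvMeasurePush]
    have hL : ((PySem.List.sorted (PySem.Dict.getD graph func PySem.Set.empty) (fun x => x) true).take bnd).length ≤ bnd := by
      simp [List.length_take]
    have hp : 0 < (bnd + 2) ^ f := Nat.pow_pos (by omega)
    have h1 : ((PySem.List.sorted (PySem.Dict.getD graph func PySem.Set.empty) (fun x => x) true).take bnd).length * (bnd + 2) ^ f ≤ bnd * (bnd + 2) ^ f :=
      Nat.mul_le_mul_right _ hL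
    have h2 : bnd * (bnd + 2) ^ f < (bnd + 2) * (bnd + 2) ^ f :=
      (Nat.mul_lt_mul_right hp).mpr (by omega)
    have h3 : (bnd + 2) ^ (f + 1) = (bnd + 2) * (bnd + 2) ^ f := by rw [pow_succ]; ring
    simp only [List.map_cons, List.sum_cons, Nat.succ_eq_add_one]
    omega

def find_module_methods_and_chains_with_target_alt (call_relations : List (String × List String)) (module_prefix : String) (target_keywords : List String) : List (String × List (List String)) :=
  let graph :=
    call_relations.foldl
      (fun g p => PySem.Dict.insert g p.1 (PySem.Set.update (PySem.Dict.getD g p.1 PySem.Set.empty) p.2))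
      PySem.Dict.empty
  let module_methods : PySem.Set String :=
    PySem.Set.ofList ((call_relations.map (·.1)).filter (fun f => PySem.Str.startswith f module_prefix))
  let bnd := (call_relations.map (·.1) ++ call_relations.flatMap (·.2)).length + 1
  (((PySem.List.sorted module_methods (fun x => x) false).foldl
    (fun res m =>
      let chains := pvLoopB graph target_keywords bnd [([], m, bnd)] []
      if chains = [] then res else PySem.Dict.insert res m chains)
    PySem.Dict.empty) : PySem.Dict String (List (List String))).items

-- ===== PRECONDITION & SPEC =====
def Spec_find_module_methods_and_chains_with_target (call_relations : List (String × List String)) (module_prefix : String) (target_keywords : List String) (out : List (String × List (List String))) : Prop := out = find_module_methods_and_chains_with_target_alt call_relations module_prefix target_keywords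
instance (call_relations : List (String × List String)) (module_prefix : String) (target_keywords : List String) (out : List (String × List (List String))) : Decidable (Spec_find_module_methods_and_chains_with_target call_relations module_prefix target_keywords out) := by unfold Spec_find_module_methods_and_chains_with_target; infer_instance

-- ===== CLAIM (what is proved, stated in full; the proofs are below) =====
def Claim_equal_find_module_methods_and_chains_with_target : Prop := ∀ (call_relations : List (String × List String)) (module_prefix : String) (target_keywords : List String), Dom_find_module_methods_and_chains_with_target call_relations module_prefix target_keywords → Spec_find_module_methods_and_chains_with_target call_relations module_prefix target_keywords (find_module_methods_and_chains_with_target call_relations module_prefix target_keywords)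

-- ===== LEMMAS AND PROOFS =====

-- step equations for the well-founded pvLoopB
theorem pvLoopB_nil (graph : PySem.Dict String (PySem.Set String)) (kws : List String) (bnd : Nat)
    (chains : List (List String)) : pvLoopB graph kws bnd [] chains = chains := by
  rw [pvLoopB.eq_def]

theorem pvLoopB_skip (graph : PySem.Dict String (PySem.Set String)) (kws : List String) (bnd : Nat)
    (chain : List String) (func : String) (fuel : Nat) (rest : List (List String × String × Nat))
    (chains : List (List String)) (h : chain.contains func = true) :
    pvLoopB graph kws bnd ((chain, func, fuel) :: rest) chains = pvLoopB graph kws bnd rest chains := by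
  rw [pvLoopB.eq_def]
  dsimp only
  rw [if_pos h]

theorem pvLoopB_zero (graph : PySem.Dict String (PySem.Set String)) (kws : List String) (bnd : Nat)
    (chain : List String) (func : String) (rest : List (List String × String × Nat))
    (chains : List (List String)) (h : ¬ chain.contains func = true) :
    pvLoopB graph kws bnd ((chain, func, 0) :: rest) chains = pvLoopB graph kws bnd rest chains := by
  rw [pvLoopB.eq_def]
  dsimp only
  rw [if_neg h]

theorem pvLoopB_hit (graph : PySem.Dict String (PySem.Set String)) (kws : List String) (bnd : Nat)
    (chain : List String) (func : String) (f : Nat) (rest : List (List String × String × Nat))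
    (chains : List (List String)) (h : ¬ chain.contains func = true)
    (hall : (kws.all (fun kw => PySem.Str.isIn kw (PySem.Str.join " -> " (chain ++ [func])))) = true) :
    pvLoopB graph kws bnd ((chain, func, f + 1) :: rest) chains
      = pvLoopB graph kws bnd rest (chains ++ [chain ++ [func]]) := by
  rw [pvLoopB.eq_def]
  dsimp only
  rw [if_neg h]
  rw [if_pos hall]

theorem pvLoopB_push (graph : PySem.Dict String (PySem.Set String)) (kws : List String) (bnd : Nat)
    (chain : List String) (func : String) (f : Nat) (rest : List (List String × String × Nat))
    (chains : List (List String)) (h : ¬ chain.contains func = true)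
    (hall : ¬ (kws.all (fun kw => PySem.Str.isIn kw (PySem.Str.join " -> " (chain ++ [func])))) = true) :
    pvLoopB graph kws bnd ((chain, func, f + 1) :: rest) chains
      = pvLoopB graph kws bnd
          (((PySem.List.sorted (PySem.Dict.getD graph func PySem.Set.empty) (fun x => x) true).take bnd).foldl
            (fun st c => (chain ++ [func], c, f) :: st) rest)
          chains := by
  rw [pvLoopB.eq_def]
  dsimp only
  rw [if_neg h]
  rw [if_neg hall]

-- pushing through a fold of conses is reverse-map-append
theorem pvFoldlPush {α β : Type} (g : α → β) :
    ∀ (L : List α) (init : List β),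
      L.foldl (fun st c => g c :: st) init = (L.map g).reverse ++ init := by
  intro L
  induction L with
  | nil => intro init; simp
  | cons c L ih => intro init; simp [ih]

-- invariant of the graph-building fold: every adjacency set is duplicate-free and drawn from the values
theorem pvGraphInv (rel : List (String × List String)) :
    ∀ (d : PySem.Dict String (PySem.Set String)),
      (∀ k, (PySem.Dict.getD d k PySem.Set.empty : List String).Nodup) →
      ∀ k,
        (PySem.Dict.getD
            (rel.foldl (fun g p => PySem.Dict.insert g p.1 (PySem.Set.update (PySem.Dict.getD g p.1 PySem.Set.empty) p.2)) d)
            k PySem.Set.empty : List String).Nodup ∧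
        ∀ x ∈ (PySem.Dict.getD
            (rel.foldl (fun g p => PySem.Dict.insert g p.1 (PySem.Set.update (PySem.Dict.getD g p.1 PySem.Set.empty) p.2)) d)
            k PySem.Set.empty : List String),
          x ∈ (PySem.Dict.getD d k PySem.Set.empty : List String) ∨ x ∈ rel.flatMap (·.2) := by
  induction rel with
  | nil => intro d hd k; exact ⟨hd k, fun x hx => Or.inl hx⟩
  | cons p rel ih =>
    intro d hd k
    have hd' : ∀ k', (PySem.Dict.getD (PySem.Dict.insert d p.1 (PySem.Set.update (PySem.Dict.getD d p.1 PySem.Set.empty) p.2)) k' PySem.Set.empty : List String).Nodup := by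
      intro k'
      rw [PySem.Dict.getD_insert]
      split_ifs with hk
      · exact PySem.Set.nodup_update _ _ (hd p.1)
      · exact hd k'
    have h := ih _ hd' k
    refine ⟨h.1, fun x hx => ?_⟩
    rcases h.2 x hx with hmem | hmem
    · rw [PySem.Dict.getD_insert] at hmem
      by_cases hk : k = p.1
      · rw [if_pos hk] at hmem
        rcases (PySem.Set.mem_union _ _ _).mp hmem with h1 | h1
        · left; rw [hk]; exact h1
        · right; rw [List.flatMap_cons]; exact List.mem_append.mpr (Or.inl h1)
      · rw [if_neg hk] at hmem; left; exact hmem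
    · right; rw [List.flatMap_cons]; exact List.mem_append.mpr (Or.inr hmem)

-- out-degree bound: each adjacency list fits under the fuel/width bound
theorem pvDegBound (rel : List (String × List String)) (k : String) :
    (PySem.Dict.getD (pvAnalyzeFunctionCalls rel) k PySem.Set.empty : List String).length
      ≤ (rel.map (·.1) ++ rel.flatMap (·.2)).length + 1 := by
  have hd0 : ∀ k', (PySem.Dict.getD (PySem.Dict.empty : PySem.Dict String (PySem.Set String)) k' PySem.Set.empty : List String).Nodup := by
    intro k'; simp [PySem.Dict.getD_empty, PySem.Set.empty]
  have h := pvGraphInv rel PySem.Dict.empty hd0 k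
  set s := (PySem.Dict.getD (pvAnalyzeFunctionCalls rel) k PySem.Set.empty : List String) with hs
  have hsub : ∀ x ∈ s, x ∈ rel.flatMap (·.2) := by
    intro x hx
    rcases h.2 x hx with h1 | h1
    · simp [PySem.Dict.getD_empty, PySem.Set.empty] at h1
    · exact h1
  have hnd : s.Nodup := h.1
  have hcard : s.length ≤ (rel.flatMap (·.2)).length := by
    have h1 : s.length = s.toFinset.card := (List.toFinset_card_of_nodup hnd).symm
    have h2 : s.toFinset ⊆ (rel.flatMap (·.2)).toFinset := by
      intro x hx
      rw [List.mem_toFinset] at *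
      exact hsub x hx
    calc s.length = s.toFinset.card := h1
      _ ≤ (rel.flatMap (·.2)).toFinset.card := Finset.card_le_card h2
      _ ≤ (rel.flatMap (·.2)).length := List.toFinset_card_le _
  simp only [List.length_append]
  omega

theorem pvGraphNodup (rel : List (String × List String)) (k : String) :
    (PySem.Dict.getD (pvAnalyzeFunctionCalls rel) k PySem.Set.empty : List String).Nodup := by
  have hd0 : ∀ k', (PySem.Dict.getD (PySem.Dict.empty : PySem.Dict String (PySem.Set String)) k' PySem.Set.empty : List String).Nodup := by
    intro k'; simp [PySem.Dict.getD_empty, PySem.Set.empty]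
  exact (pvGraphInv rel PySem.Dict.empty hd0 k).1

-- reverse-sorting a duplicate-free list is the reverse of sorting it
theorem pvSortedDesc (s : List String) (h : s.Nodup) :
    PySem.List.sorted s (fun x => x) true = (PySem.List.sorted s (fun x => x) false).reverse := by
  apply PySem.List.sorted_rev_eq_of_perm_of_pairwise_gt
  · exact (List.reverse_perm _).trans (PySem.List.sorted_perm s (fun x => x) false)
  · rw [List.pairwise_reverse]
    have hperm := PySem.List.sorted_perm s (fun x => x) false
    have hnd : (PySem.List.sorted s (fun x => x) false).Nodup := hperm.nodup_iff.mpr h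
    have hle := PySem.List.sorted_pairwise s (fun x => x)
    have := List.Pairwise.and hle hnd
    exact this.imp (fun {a b} hab => lt_of_le_of_ne hab.1 hab.2)

-- the explicit stack processes a block of same-depth frames exactly like A's child loop
theorem pvFrames (graph : PySem.Dict String (PySem.Set String)) (kws : List String) (bnd : Nat)
    (f : Nat) (chain' : List String)
    (ih : ∀ (func : String) (chain : List String) (rest : List (List String × String × Nat)) (acc : List (List String)),
      pvLoopB graph kws bnd ((chain, func, f) :: rest) acc
        = pvLoopB graph kws bnd rest (acc ++ pvDfsA graph kws f func chain chain)) :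
    ∀ (cs : List String) (rest : List (List String × String × Nat)) (acc : List (List String)),
      pvLoopB graph kws bnd (cs.map (fun c => (chain', c, f)) ++ rest) acc
        = pvLoopB graph kws bnd rest (acc ++ cs.flatMap (fun c => pvDfsA graph kws f c chain' chain')) := by
  intro cs
  induction cs with
  | nil => intro rest acc; simp
  | cons c cs ihc =>
    intro rest acc
    simp only [List.map_cons, List.cons_append]
    rw [ih, ihc]
    simp [List.flatMap_cons, List.append_assoc]

-- main bridge: one frame on the stack computes exactly A's dfs from that state
-- (the chain itself is A's visited set: A adds to visited exactly when it appends to the chain)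
theorem pvBridge (graph : PySem.Dict String (PySem.Set String)) (kws : List String) (bnd : Nat)
    (hdeg : ∀ k, (PySem.Dict.getD graph k PySem.Set.empty : List String).length ≤ bnd)
    (hnd : ∀ k, (PySem.Dict.getD graph k PySem.Set.empty : List String).Nodup) :
    ∀ (fuel : Nat) (func : String) (chain : List String) (rest : List (List String × String × Nat)) (acc : List (List String)),
      pvLoopB graph kws bnd ((chain, func, fuel) :: rest) acc
        = pvLoopB graph kws bnd rest (acc ++ pvDfsA graph kws fuel func chain chain) := by
  intro fuel
  induction fuel with
  | zero =>
    intro func chain rest acc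
    by_cases hm : chain.contains func = true
    · rw [pvLoopB_skip _ _ _ _ _ _ _ _ hm]; simp [pvDfsA]
    · rw [pvLoopB_zero _ _ _ _ _ _ _ hm]; simp [pvDfsA]
  | succ f ih =>
    intro func chain rest acc
    by_cases hm : chain.contains func = true
    · rw [pvLoopB_skip _ _ _ _ _ _ _ _ hm]
      have hm' : PySem.Set.contains chain func = true := hm
      rw [pvDfsA, if_pos hm']
      simp
    · have hm' : ¬ PySem.Set.contains chain func = true := hm
      have hadd : PySem.Set.add chain func = chain ++ [func] := by
        simp only [PySem.Set.add]
        rw [if_neg hm']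
      by_cases hall : (kws.all (fun kw => PySem.Str.isIn kw (PySem.Str.join " -> " (chain ++ [func])))) = true
      · rw [pvLoopB_hit _ _ _ _ _ _ _ _ hm hall]
        rw [pvDfsA, if_neg hm']
        dsimp only
        rw [if_pos hall]
      · rw [pvLoopB_push _ _ _ _ _ _ _ _ hm hall]
        have htake : (PySem.List.sorted (PySem.Dict.getD graph func PySem.Set.empty) (fun x => x) true).take bnd
            = PySem.List.sorted (PySem.Dict.getD graph func PySem.Set.empty) (fun x => x) true := by
          apply List.take_of_length_le
          rw [(PySem.List.sorted_perm _ _ _).length_eq]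
          exact hdeg func
        rw [htake, pvSortedDesc _ (hnd func), pvFoldlPush, List.map_reverse, List.reverse_reverse]
        rw [pvFrames graph kws bnd f (chain ++ [func]) ih]
        rw [pvDfsA, if_neg hm']
        dsimp only
        rw [if_neg hall, hadd]
        rw [PySem.List.foldl_append_eq_flatMap]
        simp

-- ===== VERDICT (by name: the statement is the Claim_ definition above) =====
theorem find_module_methods_and_chains_with_target_spec : Claim_equal_find_module_methods_and_chains_with_target := by
  intro rel pref kws _dom
  unfold Spec_find_module_methods_and_chains_with_target
  unfold find_module_methods_and_chains_with_target find_module_methods_and_chains_with_target_alt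
  dsimp only
  rw [show (rel.foldl (fun g p => PySem.Dict.insert g p.1 (PySem.Set.update (PySem.Dict.getD g p.1 PySem.Set.empty) p.2)) PySem.Dict.empty) = pvAnalyzeFunctionCalls rel from rfl]
  have hinner : ∀ m : String,
      pvLoopB (pvAnalyzeFunctionCalls rel) kws ((rel.map (·.1) ++ rel.flatMap (·.2)).length + 1)
        [([], m, (rel.map (·.1) ++ rel.flatMap (·.2)).length + 1)] []
        = pvDfsA (pvAnalyzeFunctionCalls rel) kws ((rel.map (·.1) ++ rel.flatMap (·.2)).length + 1) m [] PySem.Set.empty := by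
    intro m
    rw [pvBridge _ _ _ (fun k => pvDegBound rel k) (fun k => pvGraphNodup rel k), pvLoopB_nil]
    rfl
  congr 1
  congr 1
  funext res m
  dsimp only
  rw [hinner m]
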